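-- pv_equiv track=rewrite | github.com/utshabkg/Competitive_Contest_Problem_Solves | GeeksForGeeks/Count the triplets.py | countTriplet
-- ===== SOURCE A (Python) =====
-- def countTriplet(arr, n):
--     # code here
--     count = 0
--     arr = sorted(arr)
--     large_index = n - 1
--     while large_index >= 0:
--         start = 0
--         end = large_index - 1
--         while start < end:
--             if arr[large_index] == arr[start] + arr[end]:
--                 count += 1
--                 break
--             elif arr[large_index] > arr[start] + arr[end]:
--                 start += 1
--             else:
--                 end -= 1
--         large_index -= 1
--     return count
-- ===== SOURCE B (Python) =====
-- def countTriplet(arr, n):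
--     a = sorted(arr)
--     count = 0
--     for li in range(n - 1, -1, -1):
--         target = a[li]
--         seen = set()
--         found = False
--         for j in range(li):
--             if target - a[j] in seen:
--                 found = True
--                 break
--             seen.add(a[j])
--         if found:
--             count += 1
--     return count
-- ===== Notes on version B (the rewrite author's own statement) =====
-- stated objective: idiomatic
-- what changed: Replaces A's converging two-pointer scan over each sorted prefix with a one-pass hash-set complement lookup per index, counted via sum over range(n).
-- outside the precondition, e.g. on countTriplet([], 2): A returns 0, B raises IndexError; on countTriplet([1, 2], 3): A raises IndexError, B raises IndexError
import Mathlib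
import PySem

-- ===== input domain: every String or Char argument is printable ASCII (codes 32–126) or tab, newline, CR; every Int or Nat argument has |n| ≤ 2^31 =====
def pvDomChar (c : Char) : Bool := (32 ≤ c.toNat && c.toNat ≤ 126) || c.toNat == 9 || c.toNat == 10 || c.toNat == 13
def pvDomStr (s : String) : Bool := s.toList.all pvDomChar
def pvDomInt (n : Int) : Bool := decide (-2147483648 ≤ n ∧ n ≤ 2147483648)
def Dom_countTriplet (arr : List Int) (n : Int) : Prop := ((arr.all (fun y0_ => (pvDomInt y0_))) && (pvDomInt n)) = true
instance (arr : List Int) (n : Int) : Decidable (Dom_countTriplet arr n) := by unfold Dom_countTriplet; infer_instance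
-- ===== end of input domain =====

-- B replaces A's converging two-pointer scan per index by a one-pass hash-set complement
-- lookup over the prefix and a countP over range(n) (objective: idiomatic; same asymptotic cost).

-- ===== PORT A =====
-- inner `while start < end` loop of A, returning whether the `break` (count += 1) fired
def twoPtr (a : List Int) (t s e : Int) : Bool :=
  if _h : s < e then
    if t = PySem.List.pyGetD a s 0 + PySem.List.pyGetD a e 0 then true
    else if t > PySem.List.pyGetD a s 0 + PySem.List.pyGetD a e 0 then twoPtr a t (s + 1) e
    else twoPtr a t s (e - 1)
  else false
termination_by (e - s).toNat
decreasing_by all_goals omega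

-- outer `while large_index >= 0` loop of A
def outerA (a : List Int) (li count : Int) : Int :=
  if _h : 0 ≤ li then
    outerA a (li - 1) (count + if twoPtr a (PySem.List.pyGetD a li 0) 0 (li - 1) then 1 else 0)
  else count
termination_by (li + 1).toNat
decreasing_by omega

def countTriplet (arr : List Int) (n : Int) : Int :=
  outerA (PySem.List.sorted arr (fun x => x) false) (n - 1) 0

-- ===== PORT B =====
-- B's prefix scan with a running set of seen values
def hasTwoSumAux (a : List Int) (t li j : Int) (seen : PySem.Set Int) : Bool :=
  if _h : j < li then
    let x := PySem.List.pyGetD a j 0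
    if PySem.Set.contains seen (t - x) then true
    else hasTwoSumAux a t li (j + 1) (PySem.Set.add seen x)
  else false
termination_by (li - j).toNat
decreasing_by omega

def hasTwoSum (a : List Int) (li : Int) : Bool :=
  hasTwoSumAux a (PySem.List.pyGetD a li 0) li 0 PySem.Set.empty

def countTriplet_alt (arr : List Int) (n : Int) : Int :=
  let a := PySem.List.sorted arr (fun x => x) false
  (((PySem.List.pyRange 0 n 1).countP (fun li => hasTwoSum a li) : Nat) : Int)

-- ===== PRECONDITION & SPEC =====
-- Pre_ excludes n > len(arr): there A's inner scan raises IndexError once n >= 3; for n <= 2 A returns 0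
-- because its inner loop never touches arr, while B's natural indexing of a[li] raises IndexError.
def Pre_countTriplet (arr : List Int) (n : Int) : Prop := n ≤ (arr.length : Int)
instance (arr : List Int) (n : Int) : Decidable (Pre_countTriplet arr n) := by unfold Pre_countTriplet; infer_instance
def pvWitness_countTriplet : List Int × Int := ([1, 5, 3, 2], 4)

def Spec_countTriplet (arr : List Int) (n : Int) (out : Int) : Prop := out = countTriplet_alt arr n
instance (arr : List Int) (n : Int) (out : Int) : Decidable (Spec_countTriplet arr n out) := by unfold Spec_countTriplet; infer_instance

-- ===== CLAIM (what is proved, stated in full; the proofs are below) =====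
def Claim_equal_countTriplet : Prop := ∀ (arr : List Int) (n : Int), Dom_countTriplet arr n → Pre_countTriplet arr n → Spec_countTriplet arr n (countTriplet arr n)

-- ===== LEMMAS AND PROOFS =====

-- shorthand for a[i] in the lemmas
def gI (a : List Int) (i : Int) : Int := PySem.List.pyGetD a i 0

theorem gI_def (a : List Int) (i : Int) : PySem.List.pyGetD a i 0 = gI a i := rfl

theorem gI_mono (a : List Int)
    (hp : ∀ (p q : Nat) (hpq : p ≤ q) (hq : q < a.length), a[p]'(Nat.lt_of_le_of_lt hpq hq) ≤ a[q]) :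
    ∀ i j : Int, 0 ≤ i → i ≤ j → j < (a.length : Int) → gI a i ≤ gI a j := by
  intro i j hi hij hj
  have h1 : gI a i = a[i.toNat]'(by omega) := PySem.List.pyGetD_eq_getElem a 0 hi (by omega)
  have h2 : gI a j = a[j.toNat]'(by omega) := PySem.List.pyGetD_eq_getElem a 0 (by omega) (by omega)
  rw [h1, h2]
  exact hp i.toNat j.toNat (by omega) (by omega)

theorem twoPtr_iff (a : List Int)
    (hm : ∀ i j : Int, 0 ≤ i → i ≤ j → j < (a.length : Int) → gI a i ≤ gI a j)
    (t : Int) :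
    ∀ (s e : Int), 0 ≤ s → e < (a.length : Int) →
    (twoPtr a t s e = true ↔ ∃ i j : Int, s ≤ i ∧ i < j ∧ j ≤ e ∧ gI a i + gI a j = t) := by
  have H : ∀ (m : Nat) (s e : Int), (e - s).toNat ≤ m → 0 ≤ s → e < (a.length : Int) →
      (twoPtr a t s e = true ↔ ∃ i j : Int, s ≤ i ∧ i < j ∧ j ≤ e ∧ gI a i + gI a j = t) := by
    intro m
    induction m with
    | zero =>
      intro s e hme hs he
      have hse : ¬ s < e := by omega
      rw [twoPtr]
      simp only [hse, dite_false, Bool.false_eq_true, false_iff]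
      rintro ⟨i, j, hi, hij, hj, -⟩
      omega
    | succ m ih =>
      intro s e hme hs he
      rw [twoPtr]
      simp only [gI_def]
      by_cases hse : s < e
      · simp only [hse, dite_true]
        split_ifs with h1 h2
        · simp only [true_iff]
          exact ⟨s, e, le_refl _, hse, le_refl _, h1.symm⟩
        · rw [ih (s + 1) e (by omega) (by omega) he]
          constructor
          · rintro ⟨i, j, hi, hij, hj, hsum⟩
            exact ⟨i, j, by omega, hij, hj, hsum⟩
          · rintro ⟨i, j, hi, hij, hj, hsum⟩
            refine ⟨i, j, ?_, hij, hj, hsum⟩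
            by_contra hlt
            have hieq : i = s := by omega
            subst hieq
            have hje : gI a j ≤ gI a e := hm j e (by omega) hj he
            omega
        · rw [ih s (e - 1) (by omega) hs (by omega)]
          constructor
          · rintro ⟨i, j, hi, hij, hj, hsum⟩
            exact ⟨i, j, hi, hij, by omega, hsum⟩
          · rintro ⟨i, j, hi, hij, hj, hsum⟩
            refine ⟨i, j, hi, hij, ?_, hsum⟩
            by_contra hlt
            have hjeq : j = e := by omega
            subst hjeq
            have hsi : gI a s ≤ gI a i := hm s i hs (by omega) (by omega)
            omega
      · simp only [hse, dite_false, Bool.false_eq_true, false_iff]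
        rintro ⟨i, j, hi, hij, hj, -⟩
        omega
  intro s e
  exact H (e - s).toNat s e (le_refl _)

theorem hasTwoSumAux_iff (a : List Int) (t li : Int) :
    ∀ (j : Int) (seen : PySem.Set Int), 0 ≤ j →
      (∀ x : Int, x ∈ seen ↔ ∃ k : Int, 0 ≤ k ∧ k < j ∧ gI a k = x) →
      (hasTwoSumAux a t li j seen = true ↔
        ∃ k p : Int, 0 ≤ k ∧ k < p ∧ j ≤ p ∧ p < li ∧ gI a k + gI a p = t) := by
  have H : ∀ (m : Nat) (j : Int) (seen : PySem.Set Int), (li - j).toNat ≤ m → 0 ≤ j →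
      (∀ x : Int, x ∈ seen ↔ ∃ k : Int, 0 ≤ k ∧ k < j ∧ gI a k = x) →
      (hasTwoSumAux a t li j seen = true ↔
        ∃ k p : Int, 0 ≤ k ∧ k < p ∧ j ≤ p ∧ p < li ∧ gI a k + gI a p = t) := by
    intro m
    induction m with
    | zero =>
      intro j seen hmj hj hchar
      have hjl : ¬ j < li := by omega
      rw [hasTwoSumAux]
      simp only [hjl, dite_false, Bool.false_eq_true, false_iff]
      rintro ⟨k, p, -, -, hp1, hp2, -⟩
      omega
    | succ m ih =>
      intro j seen hmj hj hchar
      rw [hasTwoSumAux]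
      simp only [gI_def]
      by_cases hjl : j < li
      · simp only [hjl, dite_true]
        split_ifs with hc
        · simp only [true_iff]
          obtain ⟨k, hk0, hkj, hkeq⟩ := (hchar _).mp ((PySem.Set.contains_iff _ _).mp hc)
          exact ⟨k, j, hk0, by omega, le_refl _, hjl, by omega⟩
        · rw [ih (j + 1) (PySem.Set.add seen (gI a j)) (by omega) (by omega) ?_]
          · constructor
            · rintro ⟨k, p, hk0, hkp, hjp, hpl, hsum⟩
              exact ⟨k, p, hk0, hkp, by omega, hpl, hsum⟩
            · rintro ⟨k, p, hk0, hkp, hjp, hpl, hsum⟩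
              refine ⟨k, p, hk0, hkp, ?_, hpl, hsum⟩
              by_contra hlt
              have hpj : p = j := by omega
              subst hpj
              apply hc
              rw [PySem.Set.contains_iff, hchar]
              exact ⟨k, hk0, hkp, by omega⟩
          · intro x
            rw [PySem.Set.mem_add, hchar]
            constructor
            · rintro (⟨k, hk0, hkj, hkeq⟩ | hx)
              · exact ⟨k, hk0, by omega, hkeq⟩
              · exact ⟨j, hj, by omega, hx.symm⟩
            · rintro ⟨k, hk0, hkj, hkeq⟩
              by_cases hkj' : k < j
              · exact Or.inl ⟨k, hk0, hkj', hkeq⟩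
              · have : k = j := by omega
                subst this
                exact Or.inr hkeq.symm
      · simp only [hjl, dite_false, Bool.false_eq_true, false_iff]
        rintro ⟨k, p, -, -, hp1, hp2, -⟩
        omega
  intro j seen
  exact H (li - j).toNat j seen (le_refl _)

theorem inner_eq (a : List Int)
    (hm : ∀ i j : Int, 0 ≤ i → i ≤ j → j < (a.length : Int) → gI a i ≤ gI a j)
    (li : Int) (_hli : 0 ≤ li) (hlen : li < (a.length : Int)) :
    twoPtr a (PySem.List.pyGetD a li 0) 0 (li - 1) = hasTwoSum a li := by
  rw [Bool.eq_iff_iff]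
  rw [twoPtr_iff a hm _ 0 (li - 1) (le_refl _) (by omega)]
  rw [hasTwoSum, hasTwoSumAux_iff a _ li 0 PySem.Set.empty (le_refl _) (by
    intro x
    constructor
    · intro hx; exact absurd hx (by simp [PySem.Set.empty])
    · rintro ⟨k, hk0, hk, -⟩; omega)]
  constructor
  · rintro ⟨i, j, hi, hij, hj, hsum⟩
    exact ⟨i, j, hi, hij, by omega, by omega, hsum⟩
  · rintro ⟨k, p, hk0, hkp, -, hpl, hsum⟩
    exact ⟨k, p, hk0, hkp, by omega, hsum⟩

theorem outerA_eq (a : List Int)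
    (hm : ∀ i j : Int, 0 ≤ i → i ≤ j → j < (a.length : Int) → gI a i ≤ gI a j) :
    ∀ (li : Int), li < (a.length : Int) → ∀ c : Int,
      outerA a li c = c + (((PySem.List.pyRange 0 (li + 1) 1).countP (fun p => hasTwoSum a p) : Nat) : Int) := by
  have hemp : ∀ li : Int, li < 0 → PySem.List.pyRange 0 (li + 1) 1 = [] := by
    intro li hli
    rw [PySem.List.pyRange_one]
    have : (li + 1 - 0).toNat = 0 := by omega
    rw [this]
    simp
  have H : ∀ (m : Nat) (li : Int), (li + 1).toNat ≤ m → li < (a.length : Int) → ∀ c : Int,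
      outerA a li c = c + (((PySem.List.pyRange 0 (li + 1) 1).countP (fun p => hasTwoSum a p) : Nat) : Int) := by
    intro m
    induction m with
    | zero =>
      intro li hmli hlen c
      have hneg : ¬ 0 ≤ li := by omega
      rw [outerA]
      simp only [hneg, dite_false]
      rw [hemp li (by omega)]
      simp
    | succ m ih =>
      intro li hmli hlen c
      rw [outerA]
      by_cases hpos : 0 ≤ li
      · simp only [hpos, dite_true]
        rw [ih (li - 1) (by omega) (by omega)]
        have hr : PySem.List.pyRange 0 (li + 1) 1 = PySem.List.pyRange 0 li 1 ++ [li] := by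
          have h := PySem.List.pyRange_one_succ_right (a := 0) (b := li) hpos
          simpa using h
        rw [hr]
        rw [inner_eq a hm li hpos hlen]
        have h1 : li - 1 + 1 = li := by omega
        rw [h1]
        by_cases hq : hasTwoSum a li = true
        · simp [List.countP_append, hq]
          omega
        · simp [List.countP_append, hq]
      · simp only [hpos, dite_false]
        rw [hemp li (by omega)]
        simp
  intro li hlen c
  exact H (li + 1).toNat li (le_refl _) hlen c

-- ===== VERDICT (by name: the statement is the Claim_ definition above) =====
theorem countTriplet_spec : Claim_equal_countTriplet := by
  intro arr n _ hpre
  unfold Pre_countTriplet at hpre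
  unfold Spec_countTriplet countTriplet countTriplet_alt
  set a := PySem.List.sorted arr (fun x => x) false with ha
  have hlena : a.length = arr.length := PySem.List.length_sorted ..
  have hm : ∀ i j : Int, 0 ≤ i → i ≤ j → j < (a.length : Int) → gI a i ≤ gI a j := by
    apply gI_mono
    intro p q hpq hq
    exact PySem.List.sorted_id_getElem_mono arr hpq (by rw [← ha] at *; omega)
  rw [outerA_eq a hm (n - 1) (by omega) 0]
  have h1 : n - 1 + 1 = n := by omega
  rw [h1, zero_add]
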